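-- pv_equiv track=rewrite | github.com/patwadeepak/data-structures-and-algorithms | codeforces/practice/problemset/1913-B.py | solve
-- ===== SOURCE A (Python) =====
-- def solve(s):
--     zero = 0
--     ones = 0
--     for ch in s:
--         if ch == '0':
--             zero += 1
--         else:
--             ones += 1
--
--     for ch in s:
--         if ch == '0':
--             if ones > 0:
--                 ones -= 1
--             else:
--                 break
--         else:
--             if zero > 0:
--                 zero -= 1
--             else:
--                 break
--
--     return zero + ones
-- ===== SOURCE B (Python) =====
-- def solve(s):
--     z = sum(ch == '0' for ch in s)
--     o = len(s) - z
--     if z == o: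
--         return 0
--     majority_is_zero = z > o
--     threshold = min(z, o) + 1
--     cnt = 0
--     for i, ch in enumerate(s):
--         if (ch == '0') == majority_is_zero:
--             cnt += 1
--             if cnt == threshold:
--                 return len(s) - i
-- ===== Notes on version B (the rewrite author's own statement) =====
-- stated objective: alternative
-- what changed: Instead of simulating two decrementing pools over a second pass, B counts zeros, returns 0 on a balanced string, and otherwise finds the index of the (min(z,o)+1)-th majority character in one threshold-counting scan, returning len(s) - index.
import Mathlib
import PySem

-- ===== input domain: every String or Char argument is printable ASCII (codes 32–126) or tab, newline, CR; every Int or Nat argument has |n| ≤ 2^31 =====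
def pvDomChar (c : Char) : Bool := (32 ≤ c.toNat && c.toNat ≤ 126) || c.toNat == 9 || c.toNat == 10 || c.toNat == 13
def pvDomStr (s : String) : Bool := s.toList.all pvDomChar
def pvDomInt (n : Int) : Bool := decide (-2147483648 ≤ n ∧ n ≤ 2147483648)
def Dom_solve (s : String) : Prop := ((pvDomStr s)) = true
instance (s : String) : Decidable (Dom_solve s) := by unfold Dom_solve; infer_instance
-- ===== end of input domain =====

-- B replaces A's second pass over two decrementing pools by a single threshold-counting
-- scan returning len(s) - (index of the (min(z,o)+1)-th majority char); objective: alternative.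

-- ===== PORT A =====
-- A's second loop: walk the string with the two counters, break → return zero + ones
def solvePairLoop : List Char → Int → Int → Int
  | [], zero, ones => zero + ones
  | ch :: rest, zero, ones =>
    if ch == '0' then
      if ones > 0 then solvePairLoop rest zero (ones - 1) else zero + ones
    else
      if zero > 0 then solvePairLoop rest (zero - 1) ones else zero + ones

def solve (s : String) : Int :=
  let p := s.toList.foldl
    (fun (p : Int × Int) ch => if ch == '0' then (p.1 + 1, p.2) else (p.1, p.2 + 1)) (0, 0)
  solvePairLoop s.toList p.1 p.2

-- ===== PORT B =====
-- B's scan over enumerate(s): count majority chars, return len - i at the threshold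
def solveThreshLoop (maj0 : Bool) (t n : Int) : List (Int × Char) → Int → Int
  | [], _ => 0
  | (i, ch) :: rest, cnt =>
    if ((ch == '0') == maj0) then
      if cnt + 1 == t then n - i else solveThreshLoop maj0 t n rest (cnt + 1)
    else solveThreshLoop maj0 t n rest cnt

def solve_alt (s : String) : Int :=
  let l := s.toList
  let z := l.foldl (fun a ch => if ch == '0' then a + 1 else a) (0 : Int)
  let o := (l.length : Int) - z
  if z == o then 0
  else solveThreshLoop (decide (z > o)) (min z o + 1) (l.length : Int)
    (PySem.List.enumerate l 0) 0

-- ===== PRECONDITION & SPEC =====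
def Spec_solve (s : String) (out : Int) : Prop := out = solve_alt s
instance (s : String) (out : Int) : Decidable (Spec_solve s out) := by unfold Spec_solve; infer_instance

-- ===== CLAIM (what is proved, stated in full; the proofs are below) =====
def Claim_equal_solve : Prop := ∀ (s : String), Dom_solve s → Spec_solve s (solve s)

-- ===== LEMMAS AND PROOFS =====

/-- number of '0' characters, as an Int -/
def zc : List Char → Int
  | [] => 0
  | c :: r => (if c == '0' then 1 else 0) + zc r

/-- number of non-'0' characters, as an Int -/
def oc : List Char → Int
  | [] => 0
  | c :: r => (if c == '0' then 0 else 1) + oc r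

lemma zc_nonneg (l : List Char) : 0 ≤ zc l := by
  induction l with
  | nil => simp [zc]
  | cons c r ih => simp only [zc]; split <;> omega

lemma oc_nonneg (l : List Char) : 0 ≤ oc l := by
  induction l with
  | nil => simp [oc]
  | cons c r ih => simp only [oc]; split <;> omega

lemma zc_add_oc (l : List Char) : zc l + oc l = (l.length : Int) := by
  induction l with
  | nil => simp [zc, oc]
  | cons c r ih => simp only [zc, oc, List.length_cons]; split <;> push_cast <;> omega

lemma foldA_eq (l : List Char) : ∀ a b : Int,
    l.foldl (fun (p : Int × Int) ch => if ch == '0' then (p.1 + 1, p.2) else (p.1, p.2 + 1)) (a, b)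
      = (a + zc l, b + oc l) := by
  induction l with
  | nil => intro a b; simp [zc, oc]
  | cons c r ih =>
    intro a b
    by_cases h : c == '0'
    · simp only [List.foldl_cons, h, ite_true]
      rw [ih]
      simp only [zc, oc, h, ite_true, Prod.mk.injEq]
      constructor <;> ring
    · simp only [List.foldl_cons, h, Bool.false_eq_true, ite_false]
      rw [ih]
      simp only [zc, oc, h, Bool.false_eq_true, ite_false, Prod.mk.injEq]
      constructor <;> ring

lemma foldB_eq (l : List Char) : ∀ a : Int,
    l.foldl (fun a ch => if ch == '0' then a + 1 else a) a = a + zc l := by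
  induction l with
  | nil => intro a; simp [zc]
  | cons c r ih =>
    intro a
    by_cases h : c == '0' <;> simp only [List.foldl_cons, zc, h, Bool.false_eq_true,
      ite_true, ite_false] <;> rw [ih] <;> ring

lemma balanced_case : ∀ (r : List Char) (zero ones : Int),
    zero = oc r → ones = zc r → solvePairLoop r zero ones = 0 := by
  intro r
  induction r with
  | nil => intro zero ones h1 h2; simp [zc, oc] at h1 h2; simp [solvePairLoop, h1, h2]
  | cons c rest ih =>
    intro zero ones h1 h2
    by_cases h : c == '0'
    · have hz := zc_nonneg rest
      simp only [zc, oc, h, ite_true] at h1 h2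
      rw [solvePairLoop, if_pos h, if_pos (by omega)]
      exact ih _ _ (by omega) (by omega)
    · have ho := oc_nonneg rest
      simp only [zc, oc, h, Bool.false_eq_true, ite_false] at h1 h2
      rw [solvePairLoop, if_neg (by simpa using h), if_pos (by omega)]
      exact ih _ _ (by omega) (by omega)

lemma gt_case (z o n : Int) (hlt : o < z) (hn : z + o = n) :
    ∀ (r : List Char) (i cnt : Int), 0 ≤ cnt → cnt ≤ o →
    zc r = z - cnt → oc r = o - (i - cnt) →
    solvePairLoop r (z - (i - cnt)) (o - cnt)
      = solveThreshLoop true (o + 1) n (PySem.List.enumerate r i) cnt := by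
  intro r
  induction r with
  | nil =>
    intro i cnt h0 h1 hz ho
    simp only [zc] at hz
    omega
  | cons c rest ih =>
    intro i cnt h0 h1 hz ho
    rw [PySem.List.enumerate_cons]
    by_cases h : c == '0'
    · simp only [zc, oc, h, ite_true] at hz ho
      by_cases hcnt : cnt < o
      · rw [solvePairLoop, if_pos h, if_pos (by omega)]
        rw [solveThreshLoop, if_pos (by simp [h]), if_neg (by simp; omega)]
        have := ih (i + 1) (cnt + 1) (by omega) (by omega) (by omega) (by omega)
        rw [show o - cnt - 1 = o - (cnt + 1) by ring, show z - (i - cnt) = z - (i + 1 - (cnt + 1)) by ring]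
        exact this
      · -- cnt = o: A breaks, B hits the threshold
        have hco : cnt = o := by omega
        rw [solvePairLoop, if_pos h, if_neg (by omega)]
        rw [solveThreshLoop, if_pos (by simp [h]), if_pos (by simp [hco])]
        omega
    · simp only [zc, oc, h, Bool.false_eq_true, ite_false] at hz ho
      have hoc := oc_nonneg rest
      rw [solvePairLoop, if_neg (by simpa using h), if_pos (by omega)]
      rw [solveThreshLoop, if_neg (by simp [h])]
      have := ih (i + 1) cnt h0 h1 (by omega) (by omega)
      rw [show z - (i - cnt) - 1 = z - (i + 1 - cnt) by ring]
      exact this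

lemma lt_case (z o n : Int) (hlt : z < o) (hn : z + o = n) :
    ∀ (r : List Char) (i cnt : Int), 0 ≤ cnt → cnt ≤ z →
    oc r = o - cnt → zc r = z - (i - cnt) →
    solvePairLoop r (z - cnt) (o - (i - cnt))
      = solveThreshLoop false (z + 1) n (PySem.List.enumerate r i) cnt := by
  intro r
  induction r with
  | nil =>
    intro i cnt h0 h1 ho hz
    simp only [oc] at ho
    omega
  | cons c rest ih =>
    intro i cnt h0 h1 ho hz
    rw [PySem.List.enumerate_cons]
    by_cases h : c == '0'
    · simp only [zc, oc, h, ite_true] at hz ho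
      have hzc := zc_nonneg rest
      rw [solvePairLoop, if_pos h, if_pos (by omega)]
      rw [solveThreshLoop, if_neg (by simp [h])]
      have := ih (i + 1) cnt h0 h1 (by omega) (by omega)
      rw [show o - (i - cnt) - 1 = o - (i + 1 - cnt) by ring]
      exact this
    · simp only [zc, oc, h, Bool.false_eq_true, ite_false] at hz ho
      by_cases hcnt : cnt < z
      · rw [solvePairLoop, if_neg (by simpa using h), if_pos (by omega)]
        rw [solveThreshLoop, if_pos (by simp [h]), if_neg (by simp; omega)]
        have := ih (i + 1) (cnt + 1) (by omega) (by omega) (by omega) (by omega)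
        rw [show z - cnt - 1 = z - (cnt + 1) by ring, show o - (i - cnt) = o - (i + 1 - (cnt + 1)) by ring]
        exact this
      · have hco : cnt = z := by omega
        rw [solvePairLoop, if_neg (by simpa using h), if_neg (by omega)]
        rw [solveThreshLoop, if_pos (by simp [h]), if_pos (by simp [hco])]
        omega

-- ===== VERDICT (by name: the statement is the Claim_ definition above) =====
theorem solve_spec : Claim_equal_solve := by
  intro s _
  unfold Spec_solve solve solve_alt
  set l := s.toList with hl
  have hfa := foldA_eq l 0 0
  have hfb := foldB_eq l 0
  have hsum := zc_add_oc l
  simp only [hfa, hfb, zero_add]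
  by_cases heq : zc l = oc l
  · rw [if_pos (by simp; omega)]
    exact balanced_case l (zc l) (oc l) heq heq.symm
  · rw [if_neg (by simp; omega)]
    have ho : (l.length : Int) - zc l = oc l := by omega
    rw [ho]
    by_cases hgt : oc l < zc l
    · have hd : decide (zc l > oc l) = true := by simp; omega
      rw [hd]
      have hmin : min (zc l) (oc l) = oc l := by omega
      rw [hmin]
      have := gt_case (zc l) (oc l) (l.length : Int) hgt hsum l 0 0 le_rfl (oc_nonneg l)
        (by omega) (by omega)
      simpa using this
    · have hlt : zc l < oc l := by omega
      have hd : decide (zc l > oc l) = false := by simp; omega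
      rw [hd]
      have hmin : min (zc l) (oc l) = zc l := by omega
      rw [hmin]
      have := lt_case (zc l) (oc l) (l.length : Int) hlt hsum l 0 0 le_rfl (zc_nonneg l)
        (by omega) (by omega)
      simpa using this
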